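-- pv_equiv track=rewrite | github.com/theprint/LMDataTools | datacore/cleaning/text.py | remove_bad_starts
-- ===== SOURCE A (Python) =====
-- from typing import Tuple, List, Optional
--
-- def remove_bad_starts(text: str, bad_starts: Optional[List[str]] = None) -> str:
--     """
--     Remove common unwanted prefixes from text.
--
--     Args:
--         text: Input text
--         bad_starts: List of bad prefixes (uses defaults if None)
--
--     Returns:
--         Cleaned text
--     """
--     if bad_starts is None:
--         bad_starts = [
--             "combined answer:", "answer:", "answer 3:", "your answer:", "your reply:",
--             "unaltered text:", "altered text:", "answer 1 and 2 combined:", ": ",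
--             "edited answer:", "the edited answer:", "combining both answers,",
--             "combined and edited:", "combining both responses:", "here's how",
--             "okay,", "sure thing", "certainly,", "absolutely,", "alright,", "hey,",
--             "absolutely!", "certainly!", "sure!", "revised answer:", "revision:",
--             "revised text:", "edited text:", "here's the revised text:",
--             "here is the revised text:", "\n---\n", "\n", "===", "- reply:",
--             "merging both responses:", "here's the revised text based on the given rules:"
--         ]
--
--     text = text.strip()
--
--     # Keep removing bad starts until none found
--     changed = True
--     while changed:
--         changed = False
--         for bad_start in bad_starts:
--             if text.lower().startswith(bad_start.lower()):
--                 text = text[len(bad_start):].strip()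
--                 changed = True
--                 break
--
--     return text
-- ===== SOURCE B (Python) =====
-- from typing import List, Optional
--
-- _DEFAULT_BAD_STARTS = [
--     "combined answer:", "answer:", "answer 3:", "your answer:", "your reply:",
--     "unaltered text:", "altered text:", "answer 1 and 2 combined:", ": ",
--     "edited answer:", "the edited answer:", "combining both answers,",
--     "combined and edited:", "combining both responses:", "here's how",
--     "okay,", "sure thing", "certainly,", "absolutely,", "alright,", "hey,",
--     "absolutely!", "certainly!", "sure!", "revised answer:", "revision:",
--     "revised text:", "edited text:", "here's the revised text:",
--     "here is the revised text:", "\n---\n", "\n", "===", "- reply:",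
--     "merging both responses:", "here's the revised text based on the given rules:"
-- ]
--
-- def remove_bad_starts(text: str, bad_starts: Optional[List[str]] = None) -> str:
--     if bad_starts is None:
--         bad_starts = _DEFAULT_BAD_STARTS
--     s = text.strip()
--     low = s.lower()              # lowercase once
--     lbs = [b.lower() for b in bad_starts]
--     n = len(s)
--     i = 0                        # single forward pointer into s
--     changed = True
--     while changed:
--         changed = False
--         for lb in lbs:
--             if low.startswith(lb, i):
--                 i += len(lb)
--                 while i < n and s[i].isspace():
--                     i += 1
--                 changed = True
--                 break
--     return s[i:]
-- ===== Notes on version B (the rewrite author's own statement) =====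
-- stated objective: faster
-- what changed: Instead of re-stripping, re-lowercasing and re-slicing the whole remaining text on every iteration of the while loop, B lowercases the stripped text once and moves a single forward pointer, checking prefixes at the pointer and skipping whitespace incrementally, returning one final slice.
import Mathlib
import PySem

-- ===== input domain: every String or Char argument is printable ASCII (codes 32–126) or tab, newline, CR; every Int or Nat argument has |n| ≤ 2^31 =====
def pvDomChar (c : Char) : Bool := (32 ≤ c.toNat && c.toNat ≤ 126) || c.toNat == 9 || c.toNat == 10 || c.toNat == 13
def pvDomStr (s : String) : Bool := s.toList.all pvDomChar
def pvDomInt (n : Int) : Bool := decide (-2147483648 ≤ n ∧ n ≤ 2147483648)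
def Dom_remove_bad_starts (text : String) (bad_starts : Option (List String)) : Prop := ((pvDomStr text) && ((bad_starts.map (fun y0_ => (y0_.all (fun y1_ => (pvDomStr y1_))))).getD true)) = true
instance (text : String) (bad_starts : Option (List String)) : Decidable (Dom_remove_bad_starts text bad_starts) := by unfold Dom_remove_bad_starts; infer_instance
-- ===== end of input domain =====

-- B rewrites A's repeated strip-and-restart scan as one lowercase pass with a single
-- forward pointer (equal results; a timing run decides any speed label).

-- ===== PORT A =====
-- the default bad_starts list of A
def pvDefaults : List String := [
    "combined answer:", "answer:", "answer 3:", "your answer:", "your reply:",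
    "unaltered text:", "altered text:", "answer 1 and 2 combined:", ": ",
    "edited answer:", "the edited answer:", "combining both answers,",
    "combined and edited:", "combining both responses:", "here's how",
    "okay,", "sure thing", "certainly,", "absolutely,", "alright,", "hey,",
    "absolutely!", "certainly!", "sure!", "revised answer:", "revision:",
    "revised text:", "edited text:", "here's the revised text:",
    "here is the revised text:", "\n---\n", "\n", "===", "- reply:",
    "merging both responses:", "here's the revised text based on the given rules:"]

-- the inner `for bad_start in bad_starts: if text.lower().startswith(bad_start.lower()): … break`
-- = the first matching bad_start (or none)
def pvFindBad (bads : List String) (t : List Char) : Option String :=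
  bads.find? (fun b => PySem.Chars.startswith (PySem.Chars.lower t) (PySem.Chars.lower b.toList))

-- the `while changed:` loop; `text[len(bad_start):]` is a drop of len(bad_start) ≥ 0 code points.
-- Python loops forever when the matched prefix removes nothing (an empty bad_start): the
-- guard returns instead there — such inputs are outside Pre_remove_bad_starts.
def pvLoopA (bads : List String) (t : List Char) : List Char :=
  match pvFindBad bads t with
  | none => t
  | some b =>
      let t' := PySem.Chars.strip (t.drop b.toList.length)
      if h : t'.length < t.length then pvLoopA bads t' else t'
termination_by t.length

def remove_bad_starts (text : String) (bad_starts : Option (List String)) : String :=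
  let bads := match bad_starts with
    | none => pvDefaults
    | some l => l
  String.ofList (pvLoopA bads (PySem.Chars.strip text.toList))

-- ===== PORT B =====
-- Source B's inner `while i < n and s[i].isspace(): i += 1`
def pvSkipWs (s : List Char) (i : Nat) : Nat :=
  if h : i < s.length then
    if PySem.Chars.isspace s[i] then pvSkipWs s (i + 1) else i
  else i
termination_by s.length - i

-- Source B's `for lb in lbs: if low.startswith(lb, i): … break`;
-- `low.startswith(lb, i)` (0 ≤ i) is exactly `startswith (low.drop i) lb`
def pvFindLB (lbs : List (List Char)) (low : List Char) (i : Nat) : Option (List Char) :=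
  lbs.find? (fun lb => PySem.Chars.startswith (low.drop i) lb)

-- Source B's `while changed:` loop over the pointer i; where Source B would loop forever (an empty
-- lowered bad start, i.e. no forward progress) the guard returns i instead — outside Pre_.
def pvLoopB (lbs : List (List Char)) (s low : List Char) (i : Nat) : Nat :=
  match pvFindLB lbs low i with
  | none => i
  | some lb =>
      let j := pvSkipWs s (i + lb.length)
      if h : i < j ∧ j ≤ s.length then pvLoopB lbs s low j else j
termination_by s.length - i
decreasing_by omega

def remove_bad_starts_alt (text : String) (bad_starts : Option (List String)) : String :=
  let bads := match bad_starts with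
    | none => pvDefaults
    | some l => l
  let s := PySem.Chars.strip text.toList
  let low := PySem.Chars.lower s
  let lbs := bads.map (fun b => PySem.Chars.lower b.toList)
  String.ofList (s.drop (pvLoopB lbs s low 0))

-- ===== PRECONDITION & SPEC =====
-- Pre_ excludes only an explicit bad_starts list containing the empty string, on which
-- Python A (and B) loop forever; everywhere else A returns and Pre_ holds.
def Pre_remove_bad_starts (text : String) (bad_starts : Option (List String)) : Prop :=
  "" ∉ bad_starts.getD []
instance (text : String) (bad_starts : Option (List String)) : Decidable (Pre_remove_bad_starts text bad_starts) := by unfold Pre_remove_bad_starts; infer_instance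

def pvWitness_remove_bad_starts : String × Option (List String) := ("Okay, Answer: \n hello world", none)

def Spec_remove_bad_starts (text : String) (bad_starts : Option (List String)) (out : String) : Prop := out = remove_bad_starts_alt text bad_starts
instance (text : String) (bad_starts : Option (List String)) (out : String) : Decidable (Spec_remove_bad_starts text bad_starts out) := by unfold Spec_remove_bad_starts; infer_instance

-- ===== CLAIM (what is proved, stated in full; the proofs are below) =====
def Claim_equal_remove_bad_starts : Prop := ∀ (text : String) (bad_starts : Option (List String)), Dom_remove_bad_starts text bad_starts → Pre_remove_bad_starts text bad_starts → Spec_remove_bad_starts text bad_starts (remove_bad_starts text bad_starts)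

-- ===== LEMMAS AND PROOFS =====

lemma pvSkipWs_ge (s : List Char) (i : Nat) : i ≤ pvSkipWs s i := by
  rw [pvSkipWs]
  split
  · split
    · have := pvSkipWs_ge s (i + 1); omega
    · exact le_refl i
  · exact le_refl i
termination_by s.length - i

lemma pvSkipWs_le (s : List Char) (i : Nat) (h : i ≤ s.length) : pvSkipWs s i ≤ s.length := by
  rw [pvSkipWs]
  split
  · split
    · exact pvSkipWs_le s (i + 1) (by omega)
    · exact h
  · exact h
termination_by s.length - i

lemma drop_pvSkipWs (s : List Char) (i : Nat) :
    s.drop (pvSkipWs s i) = (s.drop i).dropWhile PySem.Chars.isspace := by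
  rw [pvSkipWs]
  split
  · rename_i h
    rw [List.drop_eq_getElem_cons h]
    split
    · rename_i hsp
      rw [List.dropWhile_cons_of_pos hsp]
      exact drop_pvSkipWs s (i + 1)
    · rename_i hsp
      rw [List.dropWhile_cons_of_neg hsp, ← List.drop_eq_getElem_cons h]
  · rename_i h
    have h1 : s.drop i = [] := List.drop_eq_nil_of_le (by omega)
    simp [h1]
termination_by s.length - i

-- a suffix of a right-stripped list is right-stripped
lemma rstrip_suffix {s t : List Char} (hs : PySem.Chars.rstrip s = s) (h : t <:+ s) :
    PySem.Chars.rstrip t = t := by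
  unfold PySem.Chars.rstrip at *
  have hs' := congrArg List.reverse hs
  rw [List.reverse_reverse] at hs'
  have hp : t.reverse <+: s.reverse := List.reverse_prefix.mpr h
  rcases hp with ⟨r, hr⟩
  rw [List.dropWhile_eq_self_iff] at hs'
  have ht : t.reverse.dropWhile PySem.Chars.isspace = t.reverse := by
    rw [List.dropWhile_eq_self_iff]
    intro hl
    have hlen : 0 < s.reverse.length := by
      rw [← hr, List.length_append]; omega
    have hns := hs' hlen
    have hget : s.reverse[0]'hlen = t.reverse[0]'hl := by
      rw [List.getElem_of_eq hr.symm, List.getElem_append_left]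
    rw [← hget]
    exact hns
  rw [ht, List.reverse_reverse]

lemma rstrip_strip (x : List Char) :
    PySem.Chars.rstrip (PySem.Chars.strip x) = PySem.Chars.strip x := by
  unfold PySem.Chars.strip PySem.Chars.rstrip
  rw [List.reverse_reverse, List.dropWhile_idempotent _ _]

-- strip of a suffix of a right-stripped list is its left strip, located by pvSkipWs
lemma strip_drop (s : List Char) (hs : PySem.Chars.rstrip s = s) (k : Nat) :
    PySem.Chars.strip (s.drop k) = s.drop (pvSkipWs s k) := by
  unfold PySem.Chars.strip PySem.Chars.lstrip
  rw [← drop_pvSkipWs]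
  exact rstrip_suffix hs (List.drop_suffix _ _)

lemma lower_drop (s : List Char) (i : Nat) :
    PySem.Chars.lower (s.drop i) = (PySem.Chars.lower s).drop i := by
  unfold PySem.Chars.lower
  exact List.map_drop

lemma lower_length (s : List Char) : (PySem.Chars.lower s).length = s.length := by
  simp [PySem.Chars.lower]

-- the simulation: A's text after any number of iterations is s.drop i for B's pointer i
lemma pvLoop_sim (bads : List String) (hb : ∀ b ∈ bads, b ≠ "")
    (s : List Char) (hs : PySem.Chars.rstrip s = s) (i : Nat) (hi : i ≤ s.length) :
    pvLoopA bads (s.drop i) =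
      s.drop (pvLoopB (bads.map (fun b => PySem.Chars.lower b.toList)) s (PySem.Chars.lower s) i) := by
  rw [pvLoopA, pvLoopB]
  have hfind : pvFindLB (bads.map (fun b => PySem.Chars.lower b.toList)) (PySem.Chars.lower s) i
      = Option.map (fun b => PySem.Chars.lower b.toList) (pvFindBad bads (s.drop i)) := by
    unfold pvFindLB pvFindBad
    rw [List.find?_map]
    congr 2
    funext b
    simp only [Function.comp_apply, lower_drop]
  rw [hfind]
  cases hA : pvFindBad bads (s.drop i) with
  | none => simp
  | some b =>
    simp only [Option.map_some]
    have hbne : b ≠ "" := hb b (List.mem_of_find?_eq_some hA)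
    have hpref : (PySem.Chars.lower b.toList) <+: (PySem.Chars.lower (s.drop i)) := by
      have := List.find?_some hA
      simpa [PySem.Chars.startswith, List.isPrefixOf_iff_prefix] using this
    have hlenb : 0 < b.toList.length := by
      cases hbl : b.toList with
      | nil => exact absurd (String.toList_eq_nil_iff.mp hbl) hbne
      | cons c cs => simp
    have hfits : i + b.toList.length ≤ s.length := by
      have h1 := hpref.length_le
      rw [lower_length, lower_drop, List.length_drop, lower_length] at h1
      omega
    set j := pvSkipWs s (i + b.toList.length) with hj
    have hij : i < j := by
      have := pvSkipWs_ge s (i + b.toList.length); omega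
    have hjle : j ≤ s.length := pvSkipWs_le s _ hfits
    have ht' : PySem.Chars.strip ((s.drop i).drop b.toList.length) = s.drop j := by
      rw [List.drop_drop]
      exact strip_drop s hs (i + b.toList.length)
    have hlblen : (PySem.Chars.lower b.toList).length = b.toList.length := lower_length _
    simp only [ht', hlblen, ← hj]
    rw [dif_pos (by simp [List.length_drop]; omega), dif_pos ⟨hij, hjle⟩]
    exact pvLoop_sim bads hb s hs j hjle
termination_by s.length - i
decreasing_by omega

-- ===== VERDICT (by name: the statement is the Claim_ definition above) =====
theorem remove_bad_starts_spec : Claim_equal_remove_bad_starts := by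
  intro text bad_starts _hdom hpre
  unfold Spec_remove_bad_starts remove_bad_starts remove_bad_starts_alt
  have hb : ∀ b ∈ (match bad_starts with | none => pvDefaults | some l => l), b ≠ "" := by
    cases bad_starts with
    | none => exact (by decide : ∀ b ∈ pvDefaults, b ≠ "")
    | some l =>
      intro b hbmem hbe
      exact hpre (by simpa [Option.getD, ← hbe] using hbmem)
  have hs : PySem.Chars.rstrip (PySem.Chars.strip text.toList) = PySem.Chars.strip text.toList :=
    rstrip_strip _
  have := pvLoop_sim _ hb (PySem.Chars.strip text.toList) hs 0 (Nat.zero_le _)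
  simpa using congrArg String.ofList this
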